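-- pv_equiv track=rewrite | github.com/VilMe/dictionary_oop_practice | dictionaries.py | get_sum_zero_pairs
-- ===== SOURCE A (Python) =====
-- def get_sum_zero_pairs(numbers):
--     """Given list of numbers, return list of pairs summing to 0.
--
--     Given a list of numbers, add up each individual pair of numbers.
--     Return a list of each pair of numbers that adds up to 0.
--
--     For example::
--
--         >>> sort_pairs( get_sum_zero_pairs([1, 2, 3, -2, -1]) )
--         [[-2, 2], [-1, 1]]
--
--         >>> sort_pairs( get_sum_zero_pairs([3, -3, 2, 1, -2, -1]) )
--         [[-3, 3], [-2, 2], [-1, 1]]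
--
--     This should always be a unique list, even if there are
--     duplicates in the input list::
--
--         >>> sort_pairs( get_sum_zero_pairs([1, 2, 3, -2, -1, 1, 1]) )
--         [[-2, 2], [-1, 1]]
--
--     Of course, if there are one or more zeros to pair together,
--     that's fine, too (even a single zero can pair with itself)::
--
--         >>> sort_pairs( get_sum_zero_pairs([1, 3, -1, 1, 1, 0]) )
--         [[-1, 1], [0, 0]]
--     """
--
--     zero_sum_pair = []
--     numbers = set(numbers)
--     numbers = list(numbers)
--     numbers.sort()
--     while numbers:
--         current_number = numbers[0]
--         complement = current_number * -1
--         if current_number == 0: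
--             zero_sum_pair.append([0, 0])
--         elif complement in numbers:
--             zero_sum_pair.append([current_number, complement])
--             numbers.remove(complement)
--         numbers.remove(current_number)
--     return zero_sum_pair
-- ===== SOURCE B (Python) =====
-- def get_sum_zero_pairs(numbers):
--     uniq = sorted(set(numbers))
--     has = set(uniq)
--     out = [[n, -n] for n in uniq if n < 0 and -n in has]
--     if 0 in has:
--         out.append([0, 0])
--     return out
-- ===== Notes on version B (the rewrite author's own statement) =====
-- stated objective: faster
-- what changed: Replaced the destructive while-loop that repeatedly calls list membership and list.remove on the shrinking sorted list with a single comprehension over the sorted unique negatives using O(1) hash-set membership, appending [0,0] at the end if 0 is present.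
import Mathlib
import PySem

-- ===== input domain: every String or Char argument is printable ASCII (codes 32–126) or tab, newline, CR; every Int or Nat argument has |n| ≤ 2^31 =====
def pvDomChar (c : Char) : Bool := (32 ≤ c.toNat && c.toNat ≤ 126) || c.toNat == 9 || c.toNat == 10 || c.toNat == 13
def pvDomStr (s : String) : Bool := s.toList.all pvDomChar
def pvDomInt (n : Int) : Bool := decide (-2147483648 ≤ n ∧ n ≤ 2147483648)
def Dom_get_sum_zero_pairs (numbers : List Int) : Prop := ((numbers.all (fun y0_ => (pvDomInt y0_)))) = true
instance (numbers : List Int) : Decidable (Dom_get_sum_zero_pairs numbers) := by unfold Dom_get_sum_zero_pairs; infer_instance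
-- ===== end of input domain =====

-- B replaces A's destructive while-loop (list membership + list.remove per step) by one
-- comprehension over the sorted unique negatives with set membership (objective: faster).

-- ===== PORT A =====
-- termination helper for the loop: removing an element never lengthens the list
theorem gszRemoveLen (l : List Int) (v : Int) :
    ((PySem.List.remove? l v).getD l).length ≤ l.length := by
  by_cases h : v ∈ l
  · rw [PySem.List.remove?_eq_some_erase l v h]
    simpa using List.length_erase_le (l := l) (a := v)
  · rw [(PySem.List.remove?_eq_none_iff l v).mpr h]
    simp

-- the 'while numbers:' loop of A; since current_number = numbers[0],
-- numbers.remove(current_number) drops the head (remove deletes the first occurrence)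
def gszLoop : List Int → List (List Int)
  | [] => []
  | c :: rest =>
    if c = 0 then
      [(0 : Int), 0] :: gszLoop rest
    else if (-c) ∈ (c :: rest) then
      -- the complement is not the head here (−c = c forces c = 0), so remove(complement) acts on rest
      [c, -c] :: gszLoop ((PySem.List.remove? rest (-c)).getD rest)
    else
      gszLoop rest
termination_by l => l.length
decreasing_by
  · simp
  · exact Nat.lt_succ_of_le (gszRemoveLen rest (-c))
  · simp

def get_sum_zero_pairs (numbers : List Int) : List (List Int) :=
  gszLoop (PySem.List.sorted (PySem.Set.ofList numbers) (fun x => x) false)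

-- ===== PORT B =====
def get_sum_zero_pairs_alt (numbers : List Int) : List (List Int) :=
  let uniq := PySem.List.sorted (PySem.Set.ofList numbers) (fun x => x) false
  let has := PySem.Set.ofList uniq
  let out := (uniq.filter (fun n => decide (n < 0) && PySem.Set.contains has (-n))).map
      (fun n => [n, -n])
  if PySem.Set.contains has 0 then out ++ [[0, 0]] else out

-- ===== PRECONDITION & SPEC =====
def Spec_get_sum_zero_pairs (numbers : List Int) (out : List (List Int)) : Prop := out = get_sum_zero_pairs_alt numbers
instance (numbers : List Int) (out : List (List Int)) : Decidable (Spec_get_sum_zero_pairs numbers out) := by unfold Spec_get_sum_zero_pairs; infer_instance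

-- ===== CLAIM (what is proved, stated in full; the proofs are below) =====
def Claim_equal_get_sum_zero_pairs : Prop := ∀ (numbers : List Int), Dom_get_sum_zero_pairs numbers → Spec_get_sum_zero_pairs numbers (get_sum_zero_pairs numbers)

-- ===== LEMMAS AND PROOFS =====

-- filtering ignores an erased element the predicate rejects
theorem gszFilterErase (p : Int → Bool) (a : Int) (hpa : p a = false) :
    ∀ (l : List Int), (l.erase a).filter p = l.filter p := by
  intro l
  induction l with
  | nil => simp
  | cons x xs ih =>
    by_cases hx : x = a
    · subst hx; simp [hpa]
    · rw [List.erase_cons_tail (by simpa using hx)]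
      simp only [List.filter_cons, ih]

-- Set.contains is decidable membership
theorem gszContains (s : PySem.Set Int) (x : Int) :
    PySem.Set.contains s x = decide (x ∈ s) := by
  by_cases hx : x ∈ s
  · simp [hx]
  · simp [hx]

-- characterisation of A's loop on a strictly increasing list:
-- one [n, -n] per negative n whose complement is present, then [0, 0] if 0 is present
theorem gszLoop_eq : ∀ (t : List Int), t.Pairwise (· < ·) →
    gszLoop t =
      ((t.filter (fun n => decide (n < 0) && decide ((-n) ∈ t))).map (fun n => [n, -n]))
        ++ (if (0 : Int) ∈ t then [[0, 0]] else []) := by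
  intro t
  induction t using gszLoop.induct with
  | case1 => intro _; simp [gszLoop]
  | case2 rest ih =>
    intro h
    have hrest : ∀ y ∈ rest, (0 : Int) < y := (List.pairwise_cons.mp h).1
    have h0 : (0 : Int) ∉ rest := fun hm => lt_irrefl 0 (hrest 0 hm)
    have hf : ∀ (X : List Int),
        rest.filter (fun n => decide (n < 0) && decide ((-n) ∈ X)) = [] := by
      intro X
      rw [List.filter_eq_nil_iff]
      intro n hn
      simp [not_lt.mpr (le_of_lt (hrest n hn))]
    have hr : gszLoop rest = [] := by
      rw [ih (List.pairwise_cons.mp h).2, hf rest]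
      simp [h0]
    have hfc : List.filter (fun n => decide (n < 0) && decide ((-n) ∈ (0 : Int) :: rest))
        ((0 : Int) :: rest) = [] := by
      rw [List.filter_eq_nil_iff]
      intro n hn
      rcases List.mem_cons.mp hn with h1 | h1
      · subst h1; simp
      · simp [not_lt.mpr (le_of_lt (hrest n h1))]
    rw [gszLoop, hr, hfc]
    simp
  | case3 c rest hc hm ih =>
    intro h
    have hlt : ∀ y ∈ rest, c < y := (List.pairwise_cons.mp h).1
    have hmr : (-c) ∈ rest := by
      rcases List.mem_cons.mp hm with h1 | h1
      · exact (hc (by omega)).elim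
      · exact h1
    have hcneg : c < 0 := by have := hlt _ hmr; omega
    have hrw : (PySem.List.remove? rest (-c)).getD rest = rest.erase (-c) := by
      rw [PySem.List.remove?_eq_some_erase rest (-c) hmr]; rfl
    have hp' : (rest.erase (-c)).Pairwise (· < ·) :=
      List.Pairwise.sublist (List.erase_sublist) (List.pairwise_cons.mp h).2
    have ihe := ih (by rw [hrw]; exact hp')
    rw [hrw] at ihe
    -- the head passes the filter
    have hptc : (decide (c < 0) && decide ((-c) ∈ c :: rest)) = true := by
      simp [hcneg, hm]
    -- the erased complement would be rejected by the filter anyway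
    have hfe : (rest.erase (-c)).filter (fun n => decide (n < 0) && decide ((-n) ∈ c :: rest))
        = rest.filter (fun n => decide (n < 0) && decide ((-n) ∈ c :: rest)) :=
      gszFilterErase _ (-c) (by simp; omega) rest
    -- membership in the full list and in the residual list agree on surviving elements
    have hcong : (rest.erase (-c)).filter (fun n => decide (n < 0) && decide ((-n) ∈ c :: rest))
        = (rest.erase (-c)).filter
            (fun n => decide (n < 0) && decide ((-n) ∈ rest.erase (-c))) := by
      apply List.filter_congr
      intro n hn
      have hnr : n ∈ rest := List.mem_of_mem_erase hn
      by_cases hneg : n < 0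
      · have hnc : (-n) ≠ c := by have := hlt n hnr; omega
        have hnnc : (-n) ≠ (-c) := by
          have : n ≠ c := ne_of_gt (hlt n hnr)
          omega
        have : ((-n) ∈ c :: rest) ↔ ((-n) ∈ rest.erase (-c)) := by
          rw [List.mem_cons, List.mem_erase_of_ne hnnc]
          exact ⟨fun hx => hx.resolve_left hnc, Or.inr⟩
        simp [hneg, this]
      · simp [hneg]
    have hz : ((0 : Int) ∈ c :: rest) ↔ ((0 : Int) ∈ rest.erase (-c)) := by
      rw [List.mem_cons, List.mem_erase_of_ne (by omega)]
      exact ⟨fun hx => hx.resolve_left (fun h0 => hc h0.symm), Or.inr⟩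
    rw [gszLoop]
    simp only [if_neg hc, if_pos hm, hrw, ihe, List.filter_cons, hptc, if_pos, ← hfe, hcong,
      List.map_cons, List.cons_append, hz]
  | case4 c rest hc hm ih =>
    intro h
    have hptc : (decide (c < 0) && decide ((-c) ∈ c :: rest)) = false := by
      simp [hm]
    have hmcr : (-c) ∉ rest := fun hx => hm (List.mem_cons_of_mem _ hx)
    have hcong : rest.filter (fun n => decide (n < 0) && decide ((-n) ∈ c :: rest))
        = rest.filter (fun n => decide (n < 0) && decide ((-n) ∈ rest)) := by
      apply List.filter_congr
      intro n hn
      have hnc : (-n) ≠ c := by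
        intro he
        exact hmcr (by simpa [show n = -c by omega] using hn)
      have : ((-n) ∈ c :: rest) ↔ ((-n) ∈ rest) := by
        rw [List.mem_cons]
        exact ⟨fun hx => hx.resolve_left hnc, Or.inr⟩
      simp [this]
    have hz : ((0 : Int) ∈ c :: rest) ↔ ((0 : Int) ∈ rest) := by
      rw [List.mem_cons]
      exact ⟨fun hx => hx.resolve_left (fun h0 => hc h0.symm), Or.inr⟩
    rw [gszLoop]
    simp only [if_neg hc, if_neg hm, ih (List.pairwise_cons.mp h).2, List.filter_cons, hptc,
      hcong, hz]
    simp

-- ===== VERDICT (by name: the statement is the Claim_ definition above) =====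
theorem get_sum_zero_pairs_spec : Claim_equal_get_sum_zero_pairs := by
  intro numbers _
  show get_sum_zero_pairs numbers = get_sum_zero_pairs_alt numbers
  unfold get_sum_zero_pairs get_sum_zero_pairs_alt
  set t := PySem.List.sorted (PySem.Set.ofList numbers) (fun x => x) false with ht
  have hpw : t.Pairwise (· < ·) := PySem.List.sorted_ofList_pairwise_lt numbers
  have hnd : t.Nodup := hpw.imp (fun hab => ne_of_lt hab)
  have hofl : PySem.Set.ofList t = t := PySem.Set.ofList_eq_self_of_nodup t hnd
  simp only [hofl, gszContains, gszLoop_eq t hpw]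
  by_cases h0 : (0 : Int) ∈ t <;> simp [h0]
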